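-- pv_equiv track=rewrite | github.com/SVUCTF/SVUCTF-SPRING-2024 | challenges/misc/moe_obfuscate/build/ascii_art.py | art_to_integer
-- ===== SOURCE A (Python) =====
-- def art_to_integer(ascii_art):
--     integer = 0
--     for row_index, row in enumerate(ascii_art):
--         for col_index, char in enumerate(row):
--             if char == "#":
--                 bit_position = row_index * 5 + col_index
--                 integer |= 1 << bit_position
--     return integer
-- ===== SOURCE B (Python) =====
-- def art_to_integer(ascii_art):
--     integer = 0
--     for row_index, row in enumerate(ascii_art):
--         bits = ''.join('1' if char == '#' else '0' for char in reversed(row))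
--         row_mask = int(bits, 2) if bits else 0
--         integer |= row_mask << (row_index * 5)
--     return integer
-- ===== Notes on version B (the rewrite author's own statement) =====
-- stated objective: alternative
-- what changed: Instead of testing every character and OR-ing in one bit at a computed position row_index*5+col_index, B converts each reversed row to a per-row bitmask in one step via int(bits, 2) and ORs that whole mask in with a single shift by row_index*5.
import Mathlib
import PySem

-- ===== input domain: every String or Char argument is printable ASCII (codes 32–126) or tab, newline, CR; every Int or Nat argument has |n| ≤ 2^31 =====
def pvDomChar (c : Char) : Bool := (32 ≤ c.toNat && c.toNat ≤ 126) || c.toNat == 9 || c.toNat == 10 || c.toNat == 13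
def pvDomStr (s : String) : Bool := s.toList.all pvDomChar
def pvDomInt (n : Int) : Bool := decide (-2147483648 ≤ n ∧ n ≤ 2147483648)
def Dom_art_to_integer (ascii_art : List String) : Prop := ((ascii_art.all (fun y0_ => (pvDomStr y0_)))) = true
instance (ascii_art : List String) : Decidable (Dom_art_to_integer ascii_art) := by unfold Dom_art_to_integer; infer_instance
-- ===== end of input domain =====

-- B builds each row's bitmask in one step by reading the reversed row as a base-2 numeral and ORs it
-- in at offset row_index*5, instead of A's per-character bit setting (objective: alternative decomposition).

-- ===== PORT A =====
-- Python `|` on ints → PySem.Int.bor; `1 << bit_position` → `<<<` by `.toNat` of the exponent,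
-- exact here because row_index*5 + col_index is always ≥ 0.
def art_to_integer (ascii_art : List String) : Int :=
  (PySem.List.enumerate ascii_art 0).foldl
    (fun integer rc =>
      (PySem.List.enumerate rc.2.toList 0).foldl
        (fun integer cc =>
          if cc.2 = '#' then
            PySem.Int.bor integer (Int.shiftLeft 1 (rc.1 * 5 + cc.1).toNat)
          else integer)
        integer)
    0

-- ===== PORT B =====
-- hand port of Python int(bits, 2): exact on the strings B feeds it — nonempty, '0'/'1' characters
-- only, no sign/whitespace/underscore/prefix (B guards the empty string itself).
def pvIntBase2 (bits : List Char) : Int :=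
  bits.foldl (fun acc c => 2 * acc + (if c = '1' then 1 else 0)) 0

def art_to_integer_alt (ascii_art : List String) : Int :=
  (PySem.List.enumerate ascii_art 0).foldl
    (fun integer rc =>
      let bits : List Char := rc.2.toList.reverse.map (fun char => if char = '#' then '1' else '0')
      let row_mask : Int := if bits = [] then 0 else pvIntBase2 bits
      PySem.Int.bor integer (Int.shiftLeft row_mask (rc.1 * 5).toNat))
    0

-- ===== PRECONDITION & SPEC =====
def Spec_art_to_integer (ascii_art : List String) (out : Int) : Prop := out = art_to_integer_alt ascii_art
instance (ascii_art : List String) (out : Int) : Decidable (Spec_art_to_integer ascii_art out) := by unfold Spec_art_to_integer; infer_instance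

-- ===== CLAIM (what is proved, stated in full; the proofs are below) =====
def Claim_equal_art_to_integer : Prop := ∀ (ascii_art : List String), Dom_art_to_integer ascii_art → Spec_art_to_integer ascii_art (art_to_integer ascii_art)

-- ===== LEMMAS AND PROOFS =====

-- Nat-level row mask: bit col set iff the char at col is '#'
def pvMaskN (l : List Char) : Nat :=
  l.foldr (fun c a => (if c = '#' then 1 else 0) + 2 * a) 0

-- Nat-level common model of both folds
def pvOuterN : List String → Nat → Nat → Nat
  | [], _, acc => acc
  | r :: rs, i, acc => pvOuterN rs (i + 1) (acc ||| (pvMaskN r.toList <<< (i * 5)))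

theorem pvCast_shiftLeft (m k : Nat) : (Int.shiftLeft (m : Int) k) = ((m <<< k : Nat) : Int) := by
  induction k generalizing m with
  | zero =>
    show ((m : Int) <<< (((0 : Nat)) : Int)) = _
    rw [Int.shiftLeft_eq_mul_pow]
    simp
  | succ j ih =>
    have h1 : Int.shiftLeft (m : Int) (j + 1) = Int.shiftLeft ((2 * m : Nat) : Int) j := by push_cast; rfl
    rw [h1, ih, Nat.shiftLeft_eq, Nat.shiftLeft_eq]
    congr 1; ring

theorem pvLor_shiftLeft (x y k : Nat) : (x ||| y) <<< k = (x <<< k) ||| (y <<< k) := by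
  apply Nat.eq_of_testBit_eq; intro i
  simp [Nat.testBit_shiftLeft]
  by_cases h : k ≤ i <;> simp [h]

theorem pvOne_lor (m : Nat) : 1 ||| 2 * m = 1 + 2 * m := by
  apply Nat.eq_of_testBit_eq; intro i
  cases i with
  | zero => simp
  | succ j =>
    have h1 : 2 * m / 2 = m := by omega
    have h2 : (1 + 2 * m) / 2 = m := by omega
    have h3 : (1 : Nat) / 2 = 0 := by omega
    rw [Nat.testBit_lor]
    simp [Nat.testBit_succ, h1, h2, h3]

theorem pvBit_shift (b m p : Nat) (hb : b ≤ 1) :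
    (b + 2 * m) <<< p = (b <<< p) ||| (m <<< (p + 1)) := by
  have h2 : 2 * m = m <<< 1 := by rw [Nat.shiftLeft_eq]; ring
  have h3 : (m <<< 1) <<< p = m <<< (p + 1) := by
    rw [← Nat.shiftLeft_add]; congr 1; omega
  interval_cases b
  · simp [h2, h3]
  · rw [← pvOne_lor, pvLor_shiftLeft, h2, h3]

theorem pvInnerA (cs : List Char) (i : Nat) : ∀ (j acc : Nat),
    (PySem.List.enumerate cs (j : Int)).foldl
      (fun integer cc =>
        if cc.2 = '#' then
          PySem.Int.bor integer (Int.shiftLeft 1 (((i : Int)) * 5 + cc.1).toNat)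
        else integer)
      ((acc : Nat) : Int)
    = ((acc ||| (pvMaskN cs <<< (i * 5 + j)) : Nat) : Int) := by
  induction cs with
  | nil => intro j acc; simp [PySem.List.enumerate_nil, pvMaskN]
  | cons c cs ih =>
    intro j acc
    rw [PySem.List.enumerate_cons, List.foldl_cons]
    have hexp : (((i : Int)) * 5 + (j : Int)).toNat = i * 5 + j := by
      have : ((i : Int)) * 5 + (j : Int) = ((i * 5 + j : Nat) : Int) := by push_cast; ring
      rw [this, Int.toNat_natCast]
    have hstep : pvMaskN (c :: cs) <<< (i * 5 + j)
        = ((if c = '#' then 1 else 0) <<< (i * 5 + j)) ||| (pvMaskN cs <<< (i * 5 + (j + 1))) := by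
      have : i * 5 + (j + 1) = (i * 5 + j) + 1 := by omega
      rw [this, pvMaskN]
      rw [List.foldr_cons]
      exact pvBit_shift _ _ _ (by split <;> omega)
    rw [hexp]
    by_cases hc : c = '#'
    · simp only [hc, if_true]
      have hcast : PySem.Int.bor ((acc : Nat) : Int) (Int.shiftLeft (1 : Int) (i * 5 + j))
          = (((acc ||| (1 <<< (i * 5 + j))) : Nat) : Int) := by
        have h1 : ((1 : Int)) = (((1 : Nat)) : Int) := rfl
        rw [h1, pvCast_shiftLeft, PySem.Int.bor_natCast]
      have hj1 : ((j : Int)) + 1 = (((j + 1 : Nat)) : Int) := by push_cast; ring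
      rw [hcast, hj1, ih (j + 1) (acc ||| (1 <<< (i * 5 + j)))]
      congr 1
      rw [hc] at hstep
      rw [hstep]
      simp [Nat.lor_assoc]
    · simp only [hc, if_false]
      have hj1 : ((j : Int)) + 1 = (((j + 1 : Nat)) : Int) := by push_cast; ring
      rw [hj1, ih (j + 1) acc]
      congr 1
      rw [hstep]
      simp [if_neg hc]

theorem pvMaskB (l : List Char) :
    (if (l.reverse.map (fun char => if char = '#' then '1' else '0')) = ([] : List Char) then (0 : Int)
     else pvIntBase2 (l.reverse.map (fun char => if char = '#' then '1' else '0')))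
    = ((pvMaskN l : Nat) : Int) := by
  by_cases hl : l = []
  · simp [hl, pvMaskN]
  · have hne : (l.reverse.map (fun char => if char = '#' then '1' else '0')) ≠ [] := by
      simp [hl]
    rw [if_neg hne]
    unfold pvIntBase2
    rw [List.foldl_map, List.foldl_reverse]
    induction l with
    | nil => simp [pvMaskN]
    | cons c cs ih =>
      rw [List.foldr_cons, pvMaskN, List.foldr_cons]
      by_cases hcs : cs = []
      · subst hcs
        by_cases hc : c = '#' <;> simp [hc]
      · rw [ih hcs (by simp [hcs]), ← pvMaskN]
        by_cases hc : c = '#'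
        · simp [hc]
          ring
        · simp [hc]

theorem pvOuterA (rows : List String) : ∀ (i acc : Nat),
    (PySem.List.enumerate rows (i : Int)).foldl
      (fun integer rc =>
        (PySem.List.enumerate rc.2.toList 0).foldl
          (fun integer cc =>
            if cc.2 = '#' then
              PySem.Int.bor integer (Int.shiftLeft 1 (rc.1 * 5 + cc.1).toNat)
            else integer)
          integer)
      ((acc : Nat) : Int)
    = ((pvOuterN rows i acc : Nat) : Int) := by
  induction rows with
  | nil => intro i acc; simp [PySem.List.enumerate_nil, pvOuterN]
  | cons r rs ih =>
    intro i acc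
    rw [PySem.List.enumerate_cons, List.foldl_cons]
    dsimp only
    have hinner := pvInnerA r.toList i 0 acc
    simp only [Nat.cast_zero] at hinner
    rw [hinner]
    have hi1 : ((i : Int)) + 1 = (((i + 1 : Nat)) : Int) := by push_cast; ring
    rw [hi1, ih (i + 1) (acc ||| (pvMaskN r.toList <<< (i * 5 + 0)))]
    simp [pvOuterN]

theorem pvOuterB (rows : List String) : ∀ (i acc : Nat),
    (PySem.List.enumerate rows (i : Int)).foldl
      (fun integer rc =>
        let bits : List Char := rc.2.toList.reverse.map (fun char => if char = '#' then '1' else '0')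
        let row_mask : Int := if bits = [] then 0 else pvIntBase2 bits
        PySem.Int.bor integer (Int.shiftLeft row_mask (rc.1 * 5).toNat))
      ((acc : Nat) : Int)
    = ((pvOuterN rows i acc : Nat) : Int) := by
  induction rows with
  | nil => intro i acc; simp [PySem.List.enumerate_nil, pvOuterN]
  | cons r rs ih =>
    intro i acc
    rw [PySem.List.enumerate_cons, List.foldl_cons]
    dsimp only
    rw [pvMaskB r.toList]
    have hexp : (((i : Int)) * 5).toNat = i * 5 := by
      have : ((i : Int)) * 5 = ((i * 5 : Nat) : Int) := by push_cast; ring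
      rw [this, Int.toNat_natCast]
    rw [hexp, pvCast_shiftLeft, PySem.Int.bor_natCast]
    have hi1 : ((i : Int)) + 1 = (((i + 1 : Nat)) : Int) := by push_cast; ring
    rw [hi1, ih (i + 1) (acc ||| (pvMaskN r.toList <<< (i * 5)))]
    simp [pvOuterN]

-- ===== VERDICT (by name: the statement is the Claim_ definition above) =====
theorem art_to_integer_spec : Claim_equal_art_to_integer := by
  intro ascii_art _
  unfold Spec_art_to_integer art_to_integer art_to_integer_alt
  have hA := pvOuterA ascii_art 0 0
  have hB := pvOuterB ascii_art 0 0
  simp only [Nat.cast_zero] at hA hB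
  rw [hA, hB]
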